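-- pv_equiv track=rewrite | github.com/Harry-Wang12/ctBuilder | code/Pyscript/combieTFdb/handlepathwayroute.py | getmidperstreampattern
-- ===== SOURCE A (Python) =====
-- import itertools
--
-- def getmidperstreampattern(filepatternlists,path):
--
--     patternlists=[]
--
--     finalpatterns = []
--     num2 =0
--
--     for i in range(len(path)-1):
--         if filepatternlists[path[i]][path[i+1]] == 'Activation':
--             patternlists.append(1)
--         if filepatternlists[path[i]][path[i+1]] == 'Repression':
--             patternlists.append(-1)
--         if filepatternlists[path[i]][path[i+1]] == 'Unknown':
--             patternlists.append(0)
--             num2+=1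
--
--     combinations = itertools.product([-1,1], repeat=num2)
--
--     for combination in combinations:
--         pattern = []
--         index = 0
--         for i in range(len(path)-1):
--             if patternlists[i]==1:
--                 pattern.append(1)
--             if patternlists[i]==-1:
--                 pattern.append(-1)
--             if patternlists[i]==0:
--                 pattern.append(combination[index])
--                 index +=1
--
--         finalpatterns.append(pattern)
--
--     return finalpatterns
-- ===== SOURCE B (Python) =====
-- SIGN = {'Activation': 1, 'Repression': -1, 'Unknown': 0}
--
--
-- def _expand(signs, prefix):
--     if not signs:
--         return [prefix]
--     s, rest = signs[0], signs[1:]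
--     if s == 0:
--         return _expand(rest, prefix + [-1]) + _expand(rest, prefix + [1])
--     return _expand(rest, prefix + [s])
--
--
-- def getmidperstreampattern(filepatternlists, path):
--     signs = [SIGN[filepatternlists[path[i]][path[i + 1]]]
--              for i in range(len(path) - 1)]
--     return _expand(signs, [])
-- ===== Notes on version B (the rewrite author's own statement) =====
-- stated objective: simpler
-- what changed: Replaces A's two-phase itertools.product-then-rebuild (materialise all 2^k sign combinations, then re-scan the edge list once per combination consuming the combination at unknowns) with a single recursive expansion over the sign list that branches -1 then +1 at each unknown edge and appends the sign directly otherwise.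
import Mathlib
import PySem

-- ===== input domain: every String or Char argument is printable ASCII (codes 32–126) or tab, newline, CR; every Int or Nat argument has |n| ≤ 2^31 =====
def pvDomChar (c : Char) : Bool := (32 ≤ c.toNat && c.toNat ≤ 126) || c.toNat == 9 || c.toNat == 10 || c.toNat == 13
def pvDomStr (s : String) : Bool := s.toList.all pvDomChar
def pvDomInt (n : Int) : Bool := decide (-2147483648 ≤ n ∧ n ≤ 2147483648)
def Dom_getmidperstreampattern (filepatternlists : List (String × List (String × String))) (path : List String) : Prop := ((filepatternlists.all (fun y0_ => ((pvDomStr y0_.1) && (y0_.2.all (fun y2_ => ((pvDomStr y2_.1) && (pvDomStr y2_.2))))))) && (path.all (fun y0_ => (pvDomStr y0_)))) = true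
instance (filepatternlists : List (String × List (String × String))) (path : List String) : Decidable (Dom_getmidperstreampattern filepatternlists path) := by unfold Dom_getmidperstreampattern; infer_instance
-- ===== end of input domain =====

-- B replaces A's itertools.product-plus-rebuild second phase by a single recursive
-- expansion over the sign list (branching -1 then +1 at each unknown edge); objective: simpler.

-- shared transliteration of the Python sub-expression filepatternlists[path[i]][path[i+1]]
-- (dict lookup = first match in the association list; out-of-range / missing key defaults are
-- unreachable inside Pre_)
def pvEdgeVal (filepatternlists : List (String × List (String × String))) (path : List String) (i : Int) : String :=
  (List.lookup (PySem.List.pyGetD path (i + 1) "")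
      ((List.lookup (PySem.List.pyGetD path i "") filepatternlists).getD [])).getD ""

-- ===== PORT A =====
-- literal port of itertools.product([-1, 1], repeat=n)
def pvProduct : Nat → List (List Int)
  | 0 => [[]]
  | n + 1 => ([-1, 1] : List Int).flatMap (fun x => (pvProduct n).map (fun c => x :: c))

def getmidperstreampattern (filepatternlists : List (String × List (String × String))) (path : List String) : List (List Int) :=
  -- first loop: build patternlists and count the unknowns
  let st :=
    (PySem.List.pyRange 0 ((path.length : Int) - 1) 1).foldl
      (fun (st : List Int × Nat) i =>
        let st := if pvEdgeVal filepatternlists path i = "Activation" then (st.1 ++ [(1 : Int)], st.2) else st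
        let st := if pvEdgeVal filepatternlists path i = "Repression" then (st.1 ++ [(-1 : Int)], st.2) else st
        if pvEdgeVal filepatternlists path i = "Unknown" then (st.1 ++ [(0 : Int)], st.2 + 1) else st)
      ([], 0)
  let patternlists := st.1
  let num2 := st.2
  let combinations := pvProduct num2
  -- second loop: rebuild one pattern per combination
  combinations.foldl
    (fun finalpatterns combination =>
      let p :=
        (PySem.List.pyRange 0 ((path.length : Int) - 1) 1).foldl
          (fun (pi : List Int × Int) i =>
            let pi := if PySem.List.pyGetD patternlists i 0 = 1 then (pi.1 ++ [(1 : Int)], pi.2) else pi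
            let pi := if PySem.List.pyGetD patternlists i 0 = -1 then (pi.1 ++ [(-1 : Int)], pi.2) else pi
            if PySem.List.pyGetD patternlists i 0 = 0 then
              (pi.1 ++ [PySem.List.pyGetD combination pi.2 0], pi.2 + 1)
            else pi)
          ([], 0)
      finalpatterns ++ [p.1])
    []

-- ===== PORT B =====
-- the literal SIGN table of Source B
def pvSIGN : PySem.Dict String Int :=
  PySem.Dict.ofList [("Activation", 1), ("Repression", -1), ("Unknown", 0)]

-- Source B's _expand: recursive branching over the sign list
def pvExpand : List Int → List Int → List (List Int)
  | [], pre => [pre]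
  | s :: rest, pre =>
      if s = 0 then pvExpand rest (pre ++ [-1]) ++ pvExpand rest (pre ++ [1])
      else pvExpand rest (pre ++ [s])

def getmidperstreampattern_alt (filepatternlists : List (String × List (String × String))) (path : List String) : List (List Int) :=
  let signs :=
    (PySem.List.pyRange 0 ((path.length : Int) - 1) 1).map
      (fun i => (pvSIGN.get? (pvEdgeVal filepatternlists path i)).getD 0)
  pvExpand signs []

-- ===== PRECONDITION & SPEC =====
-- the value of edge i of the path, as the Python lookups would find it (none = KeyError / IndexError)
def pvEdge? (filepatternlists : List (String × List (String × String))) (path : List String) (i : Nat) : Option String :=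
  match path[i]?, path[i + 1]? with
  | some a, some b => (List.lookup a filepatternlists).bind (fun d => List.lookup b d)
  | _, _ => none

-- Pre_ excludes inputs where A raises: a path vertex missing from the (nested) dicts (KeyError)
-- or an edge value other than the three recognised strings (later IndexError on patternlists).
def Pre_getmidperstreampattern (filepatternlists : List (String × List (String × String))) (path : List String) : Prop :=
  ∀ i ∈ List.range (path.length - 1),
    pvEdge? filepatternlists path i = some "Activation" ∨
    pvEdge? filepatternlists path i = some "Repression" ∨
    pvEdge? filepatternlists path i = some "Unknown"

instance (filepatternlists : List (String × List (String × String))) (path : List String) : Decidable (Pre_getmidperstreampattern filepatternlists path) := by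
  unfold Pre_getmidperstreampattern; infer_instance

def pvWitness_getmidperstreampattern : (List (String × List (String × String))) × List String :=
  ([("a", [("b", "Unknown")]), ("b", [("c", "Activation")])], ["a", "b", "c"])

def Spec_getmidperstreampattern (filepatternlists : List (String × List (String × String))) (path : List String) (out : List (List Int)) : Prop := out = getmidperstreampattern_alt filepatternlists path
instance (filepatternlists : List (String × List (String × String))) (path : List String) (out : List (List Int)) : Decidable (Spec_getmidperstreampattern filepatternlists path out) := by unfold Spec_getmidperstreampattern; infer_instance

-- ===== CLAIM (what is proved, stated in full; the proofs are below) =====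
def Claim_equal_getmidperstreampattern : Prop := ∀ (filepatternlists : List (String × List (String × String))) (path : List String), Dom_getmidperstreampattern filepatternlists path → Pre_getmidperstreampattern filepatternlists path → Spec_getmidperstreampattern filepatternlists path (getmidperstreampattern filepatternlists path)

-- ===== LEMMAS AND PROOFS =====

-- the sign an edge value denotes (proof-side abbreviation)
def pvSOf (v : String) : Int :=
  if v = "Activation" then 1 else if v = "Repression" then -1 else 0

-- what A's rebuild loop produces from a sign list, consuming a combination at the zeros
def pvRebuild : List Int → List Int → List Int
  | [], _ => []
  | s :: r, c => if s = 0 then c.headD 0 :: pvRebuild r c.tail else s :: pvRebuild r c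

theorem pv_phase1 (fp : List (String × List (String × String))) (path : List String)
    (vs : List String) (acc : List Int) (c : Nat)
    (h : ∀ v ∈ vs, v = "Activation" ∨ v = "Repression" ∨ v = "Unknown") :
    vs.foldl
      (fun (st : List Int × Nat) v =>
        let st := if v = "Activation" then (st.1 ++ [(1 : Int)], st.2) else st
        let st := if v = "Repression" then (st.1 ++ [(-1 : Int)], st.2) else st
        if v = "Unknown" then (st.1 ++ [(0 : Int)], st.2 + 1) else st)
      (acc, c)
    = (acc ++ vs.map pvSOf, c + (vs.map pvSOf).count 0) := by
  induction vs generalizing acc c with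
  | nil => simp
  | cons v r ih =>
    have hv := h v (List.mem_cons_self ..)
    have hr : ∀ x ∈ r, x = "Activation" ∨ x = "Repression" ∨ x = "Unknown" :=
      fun x hx => h x (List.mem_cons_of_mem _ hx)
    rcases hv with hv | hv | hv <;> subst hv <;>
      simp [List.foldl_cons, ih _ _ hr, pvSOf, List.count_cons] <;> omega

theorem pv_phase2 (signs comb : List Int) (j : Nat) (pre : List Int)
    (h : ∀ s ∈ signs, s = 1 ∨ s = -1 ∨ s = 0) :
    signs.foldl
      (fun (pi : List Int × Int) s =>
        let pi := if s = 1 then (pi.1 ++ [(1 : Int)], pi.2) else pi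
        let pi := if s = -1 then (pi.1 ++ [(-1 : Int)], pi.2) else pi
        if s = 0 then (pi.1 ++ [PySem.List.pyGetD comb pi.2 0], pi.2 + 1) else pi)
      (pre, (j : Int))
    = (pre ++ pvRebuild signs (comb.drop j), (j : Int) + signs.count 0) := by
  induction signs generalizing j pre with
  | nil => simp [pvRebuild]
  | cons s r ih =>
    have hs := h s (List.mem_cons_self ..)
    have hr : ∀ x ∈ r, x = 1 ∨ x = -1 ∨ x = 0 := fun x hx => h x (List.mem_cons_of_mem _ hx)
    have hget : comb[j]?.getD 0 = (comb.drop j).headD 0 := by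
      simp [List.headD_eq_head?_getD, List.head?_drop]
    rcases hs with hs | hs | hs <;> subst hs
    · simp only [List.foldl_cons]
      norm_num
      rw [ih _ _ hr]
      simp [pvRebuild, List.count_cons]
    · simp only [List.foldl_cons]
      norm_num
      rw [ih _ _ hr]
      simp [pvRebuild, List.count_cons]
    · simp only [List.foldl_cons]
      norm_num
      rw [hget]
      have hc : ((j : Int) + 1) = ((j + 1 : Nat) : Int) := by push_cast; ring
      rw [hc, ih _ _ hr]
      simp [pvRebuild, List.count_cons, List.drop_drop]
      push_cast; ring

theorem pv_main (signs pre : List Int) :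
    (pvProduct (signs.count 0)).map (fun c => pre ++ pvRebuild signs c)
    = pvExpand signs pre := by
  induction signs generalizing pre with
  | nil => simp [pvProduct, pvExpand, pvRebuild]
  | cons s r ih =>
    by_cases hs : s = 0
    · subst hs
      simp only [List.count_cons]
      norm_num
      have hprod : pvProduct (r.count 0 + 1)
          = ((pvProduct (r.count 0)).map (fun c => (-1 : Int) :: c))
            ++ ((pvProduct (r.count 0)).map (fun c => (1 : Int) :: c)) := by
        simp [pvProduct, List.flatMap]
      rw [hprod, List.map_append, List.map_map, List.map_map]
      have e1 : ((fun c => pre ++ pvRebuild (0 :: r) c) ∘ fun c => (-1 : Int) :: c)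
          = fun c => (pre ++ [-1]) ++ pvRebuild r c := by
        funext c; simp [pvRebuild]
      have e2 : ((fun c => pre ++ pvRebuild (0 :: r) c) ∘ fun c => (1 : Int) :: c)
          = fun c => (pre ++ [1]) ++ pvRebuild r c := by
        funext c; simp [pvRebuild]
      rw [e1, e2, ih, ih]
      simp [pvExpand]
    · have hc : (s :: r).count 0 = r.count 0 := by
        simp [List.count_cons, hs]
      rw [hc]
      have e : (fun c => pre ++ pvRebuild (s :: r) c)
          = fun c => (pre ++ [s]) ++ pvRebuild r c := by
        funext c; simp [pvRebuild, if_neg hs]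
      rw [e, ih]
      rw [pvExpand]
      simp [hs]

-- the edge values the shared sub-expression computes agree with pvEdge? inside Pre_
theorem pv_edge_bridge (fp : List (String × List (String × String))) (path : List String)
    (i : Nat) (hi : i + 1 < path.length) (v : String)
    (h : pvEdge? fp path i = some v) : pvEdgeVal fp path (i : Int) = v := by
  have h1 : path[i]? = some path[i] := List.getElem?_eq_getElem (by omega)
  have h2 : path[i + 1]? = some path[i + 1] := List.getElem?_eq_getElem hi
  unfold pvEdge? at h
  rw [h1, h2] at h
  obtain ⟨d, hd, hv⟩ := Option.bind_eq_some_iff.mp h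
  unfold pvEdgeVal
  have g1 : PySem.List.pyGetD path (i : Int) "" = path[i] := by
    simp [PySem.List.pyGetD_natCast, List.getD, List.getElem?_eq_getElem (show i < path.length by omega)]
  have g2 : PySem.List.pyGetD path ((i : Int) + 1) "" = path[i + 1] := by
    have hcast : (i : Int) + 1 = ((i + 1 : Nat) : Int) := by push_cast; ring
    rw [hcast, PySem.List.pyGetD_natCast]
    simp [List.getD, h2]
  rw [g1, g2, hd]
  simp [hv]

-- pvSIGN agrees with pvSOf on the three recognised strings
theorem pv_sign_eq (v : String) (h : v = "Activation" ∨ v = "Repression" ∨ v = "Unknown") :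
    (pvSIGN.get? v).getD 0 = pvSOf v := by
  rcases h with h | h | h <;> subst h <;> decide

-- ===== VERDICT (by name: the statement is the Claim_ definition above) =====
theorem getmidperstreampattern_spec : Claim_equal_getmidperstreampattern := by
  intro fp path _ hpre
  unfold Spec_getmidperstreampattern getmidperstreampattern getmidperstreampattern_alt
  set n := path.length - 1 with hn
  have hrange : PySem.List.pyRange 0 ((path.length : Int) - 1) 1
      = (List.range n).map (fun k : Nat => (k : Int)) := by
    rw [PySem.List.pyRange_one]
    have h1 : ((path.length : Int) - 1 - 0).toNat = n := by omega
    rw [h1]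
    exact List.map_congr_left (fun k _ => by omega)
  set vs : List String := (List.range n).map (fun k : Nat => pvEdgeVal fp path (k : Int)) with hvs
  have hval : ∀ v ∈ vs, v = "Activation" ∨ v = "Repression" ∨ v = "Unknown" := by
    intro v hv
    rw [hvs] at hv
    obtain ⟨k, hk, hkv⟩ := List.mem_map.mp hv
    have hk' : k < n := by simpa using hk
    rcases hpre k (by simpa using hk') with h | h | h <;>
      [left; (right; left); (right; right)] <;>
      rw [← hkv] <;> exact pv_edge_bridge fp path k (by omega) _ h
  -- phase 1 of A computes the sign list and the number of unknowns
  have hfold1 :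
      (PySem.List.pyRange 0 ((path.length : Int) - 1) 1).foldl
        (fun (st : List Int × Nat) i =>
          let st := if pvEdgeVal fp path i = "Activation" then (st.1 ++ [(1 : Int)], st.2) else st
          let st := if pvEdgeVal fp path i = "Repression" then (st.1 ++ [(-1 : Int)], st.2) else st
          if pvEdgeVal fp path i = "Unknown" then (st.1 ++ [(0 : Int)], st.2 + 1) else st)
        ([], 0)
      = (vs.map pvSOf, (vs.map pvSOf).count 0) := by
    rw [hrange, List.foldl_map]
    have h1 := pv_phase1 fp path vs [] 0 hval
    rw [hvs, List.foldl_map] at h1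
    simp only [List.nil_append, Nat.zero_add] at h1
    exact h1
  rw [hfold1]
  set signs := vs.map pvSOf with hsigns
  simp only
  have hlen : signs.length = n := by simp [hsigns, hvs]
  have hsmem : ∀ s ∈ signs, s = 1 ∨ s = -1 ∨ s = 0 := by
    intro s hs
    obtain ⟨v, hv, hsv⟩ := List.mem_map.mp hs
    rcases hval v hv with h | h | h <;> rw [← hsv, h] <;> simp [pvSOf]
  have hrange2 : PySem.List.pyRange 0 ((path.length : Int) - 1) 1
      = PySem.List.pyRange 0 ((signs.length : Int)) 1 := by
    rw [PySem.List.pyRange_one, PySem.List.pyRange_one]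
    have h1 : ((path.length : Int) - 1 - 0).toNat = n := by omega
    have h2 : (((signs.length : Int)) - 0).toNat = n := by omega
    rw [h1, h2]
  -- phase 2 of A rebuilds one pattern per combination
  have hinner : ∀ comb : List Int,
      (PySem.List.pyRange 0 ((path.length : Int) - 1) 1).foldl
        (fun (pi : List Int × Int) i =>
          let pi := if PySem.List.pyGetD signs i 0 = 1 then (pi.1 ++ [(1 : Int)], pi.2) else pi
          let pi := if PySem.List.pyGetD signs i 0 = -1 then (pi.1 ++ [(-1 : Int)], pi.2) else pi
          if PySem.List.pyGetD signs i 0 = 0 then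
            (pi.1 ++ [PySem.List.pyGetD comb pi.2 0], pi.2 + 1)
          else pi)
        ([], 0)
      = (pvRebuild signs comb, (signs.count 0 : Int)) := by
    intro comb
    rw [hrange2]
    have hb := PySem.List.foldl_pyRange_zero_pyGetD' signs (0 : Int)
      (fun (pi : List Int × Int) (s : Int) =>
        let pi := if s = 1 then (pi.1 ++ [(1 : Int)], pi.2) else pi
        let pi := if s = -1 then (pi.1 ++ [(-1 : Int)], pi.2) else pi
        if s = 0 then (pi.1 ++ [PySem.List.pyGetD comb pi.2 0], pi.2 + 1) else pi)
      (([], 0) : List Int × Int)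
    have hp := pv_phase2 signs comb 0 [] hsmem
    simp only [List.drop_zero, List.nil_append, Nat.cast_zero, zero_add] at hp
    exact hb.trans hp
  have houter :
      (pvProduct (signs.count 0)).foldl
        (fun (finalpatterns : List (List Int)) (combination : List Int) =>
          finalpatterns ++
            [((PySem.List.pyRange 0 ((path.length : Int) - 1) 1).foldl
              (fun (pi : List Int × Int) i =>
                let pi := if PySem.List.pyGetD signs i 0 = 1 then (pi.1 ++ [(1 : Int)], pi.2) else pi
                let pi := if PySem.List.pyGetD signs i 0 = -1 then (pi.1 ++ [(-1 : Int)], pi.2) else pi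
                if PySem.List.pyGetD signs i 0 = 0 then
                  (pi.1 ++ [PySem.List.pyGetD combination pi.2 0], pi.2 + 1)
                else pi)
              ([], 0)).1])
        []
      = (pvProduct (signs.count 0)).map (fun c => pvRebuild signs c) := by
    rw [PySem.List.foldl_append_singleton_eq_map
      (fun combination => ((PySem.List.pyRange 0 ((path.length : Int) - 1) 1).foldl
              (fun (pi : List Int × Int) i =>
                let pi := if PySem.List.pyGetD signs i 0 = 1 then (pi.1 ++ [(1 : Int)], pi.2) else pi
                let pi := if PySem.List.pyGetD signs i 0 = -1 then (pi.1 ++ [(-1 : Int)], pi.2) else pi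
                if PySem.List.pyGetD signs i 0 = 0 then
                  (pi.1 ++ [PySem.List.pyGetD combination pi.2 0], pi.2 + 1)
                else pi)
              ([], 0)).1)]
    simp only [List.nil_append]
    exact List.map_congr_left (fun c _ => by rw [hinner c])
  rw [houter]
  -- B computes the same sign list
  have hsignsB : (PySem.List.pyRange 0 ((path.length : Int) - 1) 1).map
      (fun i => (pvSIGN.get? (pvEdgeVal fp path i)).getD 0) = signs := by
    rw [hrange, List.map_map, hsigns, hvs, List.map_map]
    exact List.map_congr_left (fun k hk => by
      exact pv_sign_eq _ (hval _ (by rw [hvs]; exact List.mem_map_of_mem hk)))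
  rw [hsignsB]
  have := pv_main signs []
  simp only [List.nil_append] at this
  rw [this]
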